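-- pv_equiv track=rewrite | github.com/monees007/Homework-Python | Copied.py | topperAB
-- ===== SOURCE A (Python) =====
-- def topperAB(A,B):
--     TopperAB = []
--     for a in A:
--         for b in B:
--             p = 1#first(a)
--             q = 1#first(b)
--             if p == q:
--                 TopperAB = TopperAB + a
--     return(TopperAB)
-- ===== SOURCE B (Python) =====
-- def topperAB(A, B):
--     n = len(B)
--     out = []
--     for a in A:
--         out += a * n
--     return out
-- ===== Notes on version B (the rewrite author's own statement) =====
-- stated objective: faster
-- what changed: Computed n = len(B) once and appended a*n per element of A, removing the inner loop over B and the quadratic repeated list re-concatenation.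
import Mathlib
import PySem

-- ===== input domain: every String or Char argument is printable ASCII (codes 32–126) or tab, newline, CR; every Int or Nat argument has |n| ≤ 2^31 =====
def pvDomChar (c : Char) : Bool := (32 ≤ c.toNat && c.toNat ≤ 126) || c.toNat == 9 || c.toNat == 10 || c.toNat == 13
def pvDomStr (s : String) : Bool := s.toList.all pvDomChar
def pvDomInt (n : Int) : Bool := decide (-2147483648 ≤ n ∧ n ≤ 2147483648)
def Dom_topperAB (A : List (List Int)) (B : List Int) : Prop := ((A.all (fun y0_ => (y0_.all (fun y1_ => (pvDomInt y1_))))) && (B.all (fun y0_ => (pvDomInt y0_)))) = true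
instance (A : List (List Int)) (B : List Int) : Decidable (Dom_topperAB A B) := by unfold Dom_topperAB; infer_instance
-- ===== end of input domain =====

-- B computes n = len(B) once and appends a * n per element of A, eliminating the inner loop over B (faster in a timing run).


-- ===== PORT A =====
-- literal transliteration: nested loops, p = 1, q = 1, if p == q then TopperAB = TopperAB + a
def topperAB (A : List (List Int)) (B : List Int) : List Int :=
  A.foldl (fun TopperAB a =>
    B.foldl (fun TopperAB _b =>
      let p : Int := 1
      let q : Int := 1
      if p == q then TopperAB ++ a else TopperAB) TopperAB) []

-- ===== PORT B =====
-- out += a * n   (Python list repetition a * n = flatten of n copies of a)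
def topperAB_alt (A : List (List Int)) (B : List Int) : List Int :=
  let n := B.length
  A.foldl (fun out a => out ++ (List.replicate n a).flatten) []

-- ===== PRECONDITION & SPEC =====
def Spec_topperAB (A : List (List Int)) (B : List Int) (out : List Int) : Prop := out = topperAB_alt A B
instance (A : List (List Int)) (B : List Int) (out : List Int) : Decidable (Spec_topperAB A B out) := by unfold Spec_topperAB; infer_instance

-- ===== CLAIM (what is proved, stated in full; the proofs are below) =====
def Claim_equal_topperAB : Prop := ∀ (A : List (List Int)) (B : List Int), Dom_topperAB A B → Spec_topperAB A B (topperAB A B)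

-- ===== LEMMAS AND PROOFS =====
-- ===== VERDICT (by name: the statement is the Claim_ definition above) =====
theorem topperAB_spec : Claim_equal_topperAB := by
  intro A B _
  unfold Spec_topperAB topperAB topperAB_alt
  induction A using List.reverseRecOn with
  | nil => rfl
  | append_singleton As a ih => simp [List.foldl_append]
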